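-- pv_equiv track=rewrite | github.com/5jeon9u/BOJ | Python/Bronze/8958.OX퀴즈/OX퀴즈.py | score
-- ===== SOURCE A (Python) =====
-- def score(OX):
--     cnt = 1
--     point = 0
--     for k in OX:
--         if k == 'O':
--             point += cnt
--             cnt += 1
--         else:
--             cnt = 1
--     return point
-- ===== SOURCE B (Python) =====
-- from itertools import groupby
--
-- def score(OX):
--     total = 0
--     for key, grp in groupby(OX):
--         if key == 'O':
--             m = sum(1 for _ in grp)
--             total += m * (m + 1) // 2
--     return total
-- ===== Notes on version B (the rewrite author's own statement) =====
-- stated objective: alternative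
-- what changed: B splits the string into maximal runs with itertools.groupby and adds the triangular-number closed form m*(m+1)//2 per 'O'-run, instead of maintaining a running streak counter character by character.
import Mathlib
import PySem

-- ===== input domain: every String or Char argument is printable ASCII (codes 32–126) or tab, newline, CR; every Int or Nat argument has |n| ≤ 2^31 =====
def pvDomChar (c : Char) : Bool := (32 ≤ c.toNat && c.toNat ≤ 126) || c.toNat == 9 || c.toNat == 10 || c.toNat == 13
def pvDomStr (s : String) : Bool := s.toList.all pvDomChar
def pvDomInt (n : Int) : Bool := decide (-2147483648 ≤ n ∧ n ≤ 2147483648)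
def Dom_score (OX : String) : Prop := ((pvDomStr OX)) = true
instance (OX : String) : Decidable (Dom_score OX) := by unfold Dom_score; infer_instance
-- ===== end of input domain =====

-- B groups the string into maximal runs and adds the closed form m*(m+1)//2 per 'O'-run
-- instead of A's running streak counter; same cost, different decomposition.

-- ===== PORT A =====
-- state = (cnt, point), exactly A's two variables
def pvStep (s : Int × Int) (k : Char) : Int × Int :=
  if k = 'O' then (s.1 + 1, s.2 + s.1) else (1, s.2)

def score (OX : String) : Int :=
  (OX.toList.foldl pvStep (1, 0)).2

-- ===== PORT B =====
-- transliteration of Source B: each step consumes one maximal run (groupby group),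
-- m = group length; 'O'-groups contribute m*(m+1)//2 (exact: m*(m+1) is even).
def scoreAltGo : List Char → Int
  | [] => 0
  | c :: rest =>
    let m : Nat := (rest.takeWhile (fun y => y == c)).length + 1
    (if c = 'O' then ((m * (m + 1)) / 2 : Nat) else 0) +
      scoreAltGo (rest.dropWhile (fun y => y == c))
termination_by l => l.length
decreasing_by
  simp only [List.length_cons]
  exact Nat.lt_succ_of_le (List.length_dropWhile_le _ _)

def score_alt (OX : String) : Int := scoreAltGo OX.toList

-- ===== PRECONDITION & SPEC =====
def Spec_score (OX : String) (out : Int) : Prop := out = score_alt OX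
instance (OX : String) (out : Int) : Decidable (Spec_score OX out) := by unfold Spec_score; infer_instance

-- ===== CLAIM (what is proved, stated in full; the proofs are below) =====
def Claim_equal_score : Prop := ∀ (OX : String), Dom_score OX → Spec_score OX (score OX)

-- ===== LEMMAS AND PROOFS =====

-- sum cnt + (cnt+1) + … + (cnt+m-1), the points A gains over a run of m 'O's
def pvPoly (cnt : Int) : Nat → Int
  | 0 => 0
  | m + 1 => cnt + pvPoly (cnt + 1) m

def triNat : Nat → Nat
  | 0 => 0
  | n + 1 => triNat n + (n + 1)

theorem triNat_two_mul (n : Nat) : 2 * triNat n = n * (n + 1) := by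
  induction n with
  | zero => rfl
  | succ k ih => simp only [triNat, Nat.mul_add, ih]; ring

theorem triNat_eq (n : Nat) : triNat n = n * (n + 1) / 2 := by
  have := triNat_two_mul n; omega

theorem pvPoly_eq (m : Nat) : ∀ cnt : Int, pvPoly cnt m = m * (cnt - 1) + (triNat m : Int) := by
  induction m with
  | zero => intro cnt; simp [pvPoly, triNat]
  | succ k ih =>
    intro cnt
    simp only [pvPoly, triNat, ih (cnt + 1)]
    push_cast
    ring

theorem foldl_skip (ys : List Char) (l : List Char) (p : Int)
    (h : ∀ y ∈ ys, ¬ y = 'O') :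
    List.foldl pvStep (1, p) (ys ++ l) = List.foldl pvStep (1, p) l := by
  induction ys with
  | nil => rfl
  | cons y t ih =>
    have hy : ¬ y = 'O' := h y (by simp)
    simp only [List.cons_append, List.foldl_cons, pvStep, if_neg hy]
    exact ih (fun z hz => h z (by simp [hz]))

theorem foldl_rep (m : Nat) : ∀ (cnt p : Int) (l : List Char),
    List.foldl pvStep (cnt, p) (List.replicate m 'O' ++ l)
      = List.foldl pvStep (cnt + m, p + pvPoly cnt m) l := by
  induction m with
  | zero => intro cnt p l; simp [pvPoly]
  | succ k ih =>
    intro cnt p l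
    simp only [List.replicate_succ, List.cons_append, List.foldl_cons, pvStep, if_true]
    rw [ih (cnt + 1) (p + cnt) l]
    simp only [pvPoly]
    push_cast
    ring_nf

theorem foldl_head_reset (l : List Char) (cnt cnt' p : Int)
    (h : ∀ x, l.head? = some x → ¬ x = 'O') :
    (List.foldl pvStep (cnt, p) l).2 = (List.foldl pvStep (cnt', p) l).2 := by
  cases l with
  | nil => rfl
  | cons x t =>
    have hx : ¬ x = 'O' := h x rfl
    simp [List.foldl_cons, pvStep, if_neg hx]

theorem head_dropWhile {q : Char → Bool} : ∀ (l : List Char) (x : Char),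
    (List.dropWhile q l).head? = some x → q x = false := by
  intro l
  induction l with
  | nil => intro x h; simp [List.dropWhile] at h
  | cons c t ih =>
    intro x h
    by_cases hc : q c
    · simp [List.dropWhile, hc] at h; exact ih x h
    · simp [List.dropWhile, hc] at h
      subst h; simpa using hc

theorem score_main : ∀ (n : Nat) (l : List Char), l.length ≤ n → ∀ p : Int,
    (List.foldl pvStep (1, p) l).2 = p + scoreAltGo l := by
  intro n
  induction n with
  | zero =>
    intro l hl p
    have : l = [] := List.eq_nil_of_length_eq_zero (Nat.le_zero.mp hl)
    subst this; simp [scoreAltGo]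
  | succ k ih =>
    intro l hl p
    cases l with
    | nil => simp [scoreAltGo]
    | cons c rest =>
      have hsplit : rest = rest.takeWhile (fun y => y == c) ++ rest.dropWhile (fun y => y == c) :=
        (List.takeWhile_append_dropWhile).symm
      have hlen' : (rest.dropWhile (fun y => y == c)).length ≤ k := by
        have h1 := List.length_dropWhile_le (fun y => y == c) rest
        simp only [List.length_cons] at hl
        omega
      by_cases hc : c = 'O'
      · subst hc
        -- the run of 'O's
        have hrep : List.takeWhile (fun y => y == 'O') rest
            = List.replicate (List.takeWhile (fun y => y == 'O') rest).length 'O' := by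
          apply List.eq_replicate_of_mem
          intro y hy
          have := List.mem_takeWhile_imp hy
          simpa using this
        set m : Nat := (List.takeWhile (fun y => y == 'O') rest).length with hm
        have hl2 : ('O' :: rest) = List.replicate (m + 1) 'O' ++ rest.dropWhile (fun y => y == 'O') := by
          rw [List.replicate_succ]
          simp only [List.cons_append]
          congr 1
          conv_lhs => rw [hsplit]
          rw [hrep]
        conv_lhs => rw [hl2, foldl_rep]
        have hhead : ∀ x, (rest.dropWhile (fun y => y == 'O')).head? = some x → ¬ x = 'O' := by
          intro x hx hxO
          have := head_dropWhile _ x hx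
          simp [hxO] at this
        rw [foldl_head_reset _ _ 1 _ hhead]
        rw [ih _ hlen' (p + pvPoly 1 (m + 1))]
        have hpoly : pvPoly 1 (m + 1) = (((m + 1) * (m + 1 + 1)) / 2 : Nat) := by
          rw [pvPoly_eq, triNat_eq]; push_cast; ring
        show p + pvPoly 1 (m + 1) + scoreAltGo (rest.dropWhile (fun y => y == 'O'))
            = p + scoreAltGo ('O' :: rest)
        rw [scoreAltGo]
        simp only [← hm, hpoly, reduceIte]
        ring
      · -- a non-'O' run: point unchanged, counter resets
        have hstep : pvStep (1, p) c = (1, p) := by simp [pvStep, if_neg hc]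
        simp only [List.foldl_cons, hstep]
        conv_lhs => rw [hsplit]
        rw [foldl_skip _ _ p (by
          intro y hy hyO
          have := List.mem_takeWhile_imp hy
          rw [hyO] at this
          simp at this
          exact hc this.symm)]
        rw [ih _ hlen' p]
        rw [scoreAltGo]
        simp [if_neg hc]

-- ===== VERDICT (by name: the statement is the Claim_ definition above) =====
theorem score_spec : Claim_equal_score := by
  intro OX _
  unfold Spec_score score score_alt
  rw [score_main OX.toList.length OX.toList (le_refl _) 0]
  simp
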